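-- pv_equiv track=rewrite | github.com/mzperezous/grokking-the-coding-interview | python/src/two_pointers.py | minimum_window_sort
-- ===== SOURCE A (Python) =====
-- from typing import List
--
-- def minimum_window_sort(nums: List[int]):
--     """ Returns the length of the shortest subarray that needs to be sorted in order for the full list to be sorted.
--         Time complexity: O(n)
--         Space complexity: O(1)
--
--         Post-submission notes: Review, missed edge case
--     """
--
--     l, r = 0, len(nums) - 1
--
--     while r > 0 and nums[r] >= nums[r - 1]:
--         r -= 1
--     while l < len(nums) - 1 and nums[l] <= nums[l + 1]:
--         l += 1
--
--     # Already sorted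
--     if l == len(nums) - 1:
--         return 0
--
--     sub_max = None
--     sub_min = None
--
--     # Get minimum and maximums of current subarray
--     for i in range(l, r + 1):
--         if sub_max is None:
--             sub_max = nums[i]
--             sub_min = nums[i]
--             continue
--         sub_max = max(sub_max, nums[i])
--         sub_min = min(sub_min, nums[i])
--
--     # Extend toward beginning w.r.t. sub_min
--     while l > 0 and nums[l - 1] > sub_min:
--         l -= 1
--     # Extend toward end w.r.t. sub_max
--     while r < len(nums) - 1 and nums[r + 1] < sub_max:
--         r += 1
--
--     return r + 1 - l
-- ===== SOURCE B (Python) =====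
-- def minimum_window_sort(nums):
--     s = sorted(nums)
--     diffs = [i for i in range(len(nums)) if nums[i] != s[i]]
--     return diffs[-1] - diffs[0] + 1 if diffs else 0
-- ===== Notes on version B (the rewrite author's own statement) =====
-- stated objective: simpler
-- what changed: Replaces A's two-pointer shrink-from-both-ends, window min/max scan and extension loops by the sort-then-compare strategy: sort a copy and return last-mismatch - first-mismatch + 1 (0 if no mismatch).
import Mathlib
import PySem

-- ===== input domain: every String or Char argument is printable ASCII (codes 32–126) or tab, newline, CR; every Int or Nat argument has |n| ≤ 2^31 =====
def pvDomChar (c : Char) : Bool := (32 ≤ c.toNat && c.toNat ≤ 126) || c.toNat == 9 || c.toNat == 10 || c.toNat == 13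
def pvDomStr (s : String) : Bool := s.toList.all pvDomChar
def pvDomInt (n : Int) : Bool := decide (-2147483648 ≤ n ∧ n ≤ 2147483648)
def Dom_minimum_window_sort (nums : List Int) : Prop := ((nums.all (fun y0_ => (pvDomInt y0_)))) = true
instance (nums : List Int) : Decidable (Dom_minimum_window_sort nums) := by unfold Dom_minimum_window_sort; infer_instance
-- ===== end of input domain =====

-- B replaces A's two-pointer shrink/extend scheme by sort-then-compare (first/last mismatch with the sorted copy): simpler, not faster.


-- ===== PORT A =====
-- while r > 0 and nums[r] >= nums[r - 1]: r -= 1     (indices are always in range when read; pyGetD's default is never used)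
def mwsShrinkR (nums : List Int) (r : Int) : Int :=
  if h : 0 < r ∧ PySem.List.pyGetD nums (r - 1) 0 ≤ PySem.List.pyGetD nums r 0 then
    mwsShrinkR nums (r - 1)
  else r
termination_by r.toNat
decreasing_by omega

-- while l < len(nums) - 1 and nums[l] <= nums[l + 1]: l += 1
def mwsGrowL (nums : List Int) (l : Int) : Int :=
  if h : l < (nums.length : Int) - 1 ∧ PySem.List.pyGetD nums l 0 ≤ PySem.List.pyGetD nums (l + 1) 0 then
    mwsGrowL nums (l + 1)
  else l
termination_by ((nums.length : Int) - 1 - l).toNat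
decreasing_by omega

-- body of "for i in range(l, r + 1)": state = None | (sub_max, sub_min)
def mwsStep (nums : List Int) (st : Option (Int × Int)) (i : Int) : Option (Int × Int) :=
  match st with
  | none => some (PySem.List.pyGetD nums i 0, PySem.List.pyGetD nums i 0)
  | some (mx, mn) => some (max mx (PySem.List.pyGetD nums i 0), min mn (PySem.List.pyGetD nums i 0))

-- while l > 0 and nums[l - 1] > sub_min: l -= 1
def mwsExtL (nums : List Int) (subMin : Int) (l : Int) : Int :=
  if h : 0 < l ∧ subMin < PySem.List.pyGetD nums (l - 1) 0 then
    mwsExtL nums subMin (l - 1)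
  else l
termination_by l.toNat
decreasing_by omega

-- while r < len(nums) - 1 and nums[r + 1] < sub_max: r += 1
def mwsExtR (nums : List Int) (subMax : Int) (r : Int) : Int :=
  if h : r < (nums.length : Int) - 1 ∧ PySem.List.pyGetD nums (r + 1) 0 < subMax then
    mwsExtR nums subMax (r + 1)
  else r
termination_by ((nums.length : Int) - 1 - r).toNat
decreasing_by omega

def minimum_window_sort (nums : List Int) : Int :=
  let n : Int := nums.length
  let r := mwsShrinkR nums (n - 1)
  let l := mwsGrowL nums 0
  if l = n - 1 then 0
  else
    let mm := (PySem.List.pyRange l (r + 1) 1).foldl (mwsStep nums) none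
    let l2 := mwsExtL nums ((mm.map Prod.snd).getD 0) l   -- sub_min (never None on this branch)
    let r2 := mwsExtR nums ((mm.map Prod.fst).getD 0) r   -- sub_max
    r2 + 1 - l2

-- ===== PORT B =====
-- s = sorted(nums); diffs = [i for i in range(len(nums)) if nums[i] != s[i]]; return diffs[-1] - diffs[0] + 1 if diffs else 0
def minimum_window_sort_alt (nums : List Int) : Int :=
  let s := PySem.List.sorted nums (fun x => x) false
  let diffs := (PySem.List.pyRange 0 (nums.length : Int) 1).filter
      (fun i => PySem.List.pyGetD nums i 0 ≠ PySem.List.pyGetD s i 0)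
  if diffs = [] then 0
  else PySem.List.pyGetD diffs (-1) 0 - PySem.List.pyGetD diffs 0 0 + 1

-- ===== PRECONDITION & SPEC =====
def Spec_minimum_window_sort (nums : List Int) (out : Int) : Prop := out = minimum_window_sort_alt nums
instance (nums : List Int) (out : Int) : Decidable (Spec_minimum_window_sort nums out) := by unfold Spec_minimum_window_sort; infer_instance

-- ===== CLAIM (what is proved, stated in full; the proofs are below) =====
def Claim_equal_minimum_window_sort : Prop := ∀ (nums : List Int), Dom_minimum_window_sort nums → Spec_minimum_window_sort nums (minimum_window_sort nums)

-- ===== LEMMAS AND PROOFS =====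

-- interval monotonicity from adjacent ascent
lemma mwsChainMono (g : Int → Int) (a b : Int)
    (hadj : ∀ k, a ≤ k → k < b → g k ≤ g (k + 1)) :
    ∀ i j, a ≤ i → i ≤ j → j ≤ b → g i ≤ g j := by
  have key : ∀ (d : Nat) (i j : Int), a ≤ i → i ≤ j → j ≤ b → j - i = (d : Int) → g i ≤ g j := by
    intro d
    induction d with
    | zero =>
      intro i j h1 h2 h3 h4
      have hij : i = j := by omega
      rw [hij]
    | succ d ih =>
      intro i j hi hij hjb hd
      have h1 : g i ≤ g (i + 1) := hadj i hi (by omega)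
      have h2 := ih (i + 1) j (by omega) (by omega) hjb (by omega)
      omega
  intro i j hi hij hjb
  exact key (j - i).toNat i j hi hij hjb (by omega)

lemma mwsGrowL_spec (nums : List Int) (l : Int) :
    l ≤ mwsGrowL nums l ∧
    (l ≤ (nums.length : Int) - 1 → mwsGrowL nums l ≤ (nums.length : Int) - 1) ∧
    (∀ k, l ≤ k → k < mwsGrowL nums l →
      PySem.List.pyGetD nums k 0 ≤ PySem.List.pyGetD nums (k + 1) 0) ∧
    (mwsGrowL nums l < (nums.length : Int) - 1 →
      PySem.List.pyGetD nums (mwsGrowL nums l + 1) 0 < PySem.List.pyGetD nums (mwsGrowL nums l) 0) := by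
  induction l using mwsGrowL.induct (nums := nums) with
  | case1 l h ih =>
    rw [mwsGrowL.eq_def, dif_pos h]
    obtain ⟨ih1, ih2, ih3, ih4⟩ := ih
    refine ⟨by omega, fun _ => ih2 (by omega), ?_, ih4⟩
    intro k hk1 hk2
    rcases eq_or_lt_of_le hk1 with rfl | hlt
    · exact h.2
    · exact ih3 k (by omega) hk2
  | case2 l h =>
    rw [mwsGrowL.eq_def, dif_neg h]
    refine ⟨le_refl _, fun h' => h', fun k hk1 hk2 => absurd hk1 (by omega), fun hlt => ?_⟩
    rcases not_and_or.mp h with h1 | h2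
    · omega
    · omega

lemma mwsShrinkR_spec (nums : List Int) (r : Int) :
    mwsShrinkR nums r ≤ r ∧
    (0 ≤ r → 0 ≤ mwsShrinkR nums r) ∧
    (∀ k, mwsShrinkR nums r < k → k ≤ r →
      PySem.List.pyGetD nums (k - 1) 0 ≤ PySem.List.pyGetD nums k 0) ∧
    (0 < mwsShrinkR nums r →
      PySem.List.pyGetD nums (mwsShrinkR nums r) 0 < PySem.List.pyGetD nums (mwsShrinkR nums r - 1) 0) := by
  induction r using mwsShrinkR.induct (nums := nums) with
  | case1 r h ih =>
    rw [mwsShrinkR.eq_def, dif_pos h]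
    obtain ⟨ih1, ih2, ih3, ih4⟩ := ih
    refine ⟨by omega, fun _ => ih2 (by omega), ?_, ih4⟩
    intro k hk1 hk2
    rcases eq_or_lt_of_le hk2 with rfl | hlt
    · exact h.2
    · exact ih3 k hk1 (by omega)
  | case2 r h =>
    rw [mwsShrinkR.eq_def, dif_neg h]
    refine ⟨le_refl _, fun h' => h', fun k hk1 hk2 => absurd hk1 (by omega), fun hlt => ?_⟩
    rcases not_and_or.mp h with h1 | h2
    · omega
    · omega

lemma mwsExtL_spec (nums : List Int) (m l : Int) :
    mwsExtL nums m l ≤ l ∧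
    (0 ≤ l → 0 ≤ mwsExtL nums m l) ∧
    (∀ k, mwsExtL nums m l ≤ k → k < l → m < PySem.List.pyGetD nums k 0) ∧
    (0 < mwsExtL nums m l → PySem.List.pyGetD nums (mwsExtL nums m l - 1) 0 ≤ m) := by
  induction l using mwsExtL.induct (nums := nums) (subMin := m) with
  | case1 l h ih =>
    rw [mwsExtL.eq_def, dif_pos h]
    obtain ⟨ih1, ih2, ih3, ih4⟩ := ih
    refine ⟨by omega, fun _ => ih2 (by omega), ?_, ih4⟩
    intro k hk1 hk2
    rcases eq_or_lt_of_le (show k ≤ l - 1 by omega) with rfl | hlt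
    · exact h.2
    · exact ih3 _ hk1 (by omega)
  | case2 l h =>
    rw [mwsExtL.eq_def, dif_neg h]
    refine ⟨le_refl _, fun h' => h', fun k hk1 hk2 => absurd hk1 (by omega), fun hlt => ?_⟩
    rcases not_and_or.mp h with h1 | h2
    · omega
    · omega

lemma mwsExtR_spec (nums : List Int) (M r : Int) :
    r ≤ mwsExtR nums M r ∧
    (r ≤ (nums.length : Int) - 1 → mwsExtR nums M r ≤ (nums.length : Int) - 1) ∧
    (∀ k, r < k → k ≤ mwsExtR nums M r → PySem.List.pyGetD nums k 0 < M) ∧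
    (mwsExtR nums M r < (nums.length : Int) - 1 →
      M ≤ PySem.List.pyGetD nums (mwsExtR nums M r + 1) 0) := by
  induction r using mwsExtR.induct (nums := nums) (subMax := M) with
  | case1 r h ih =>
    rw [mwsExtR.eq_def, dif_pos h]
    obtain ⟨ih1, ih2, ih3, ih4⟩ := ih
    refine ⟨by omega, fun _ => ih2 (by omega), ?_, ih4⟩
    intro k hk1 hk2
    rcases eq_or_lt_of_le (show r + 1 ≤ k by omega) with heq | hlt
    · rw [← heq]; exact h.2
    · exact ih3 _ (by omega) hk2
  | case2 r h =>
    rw [mwsExtR.eq_def, dif_neg h]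
    refine ⟨le_refl _, fun h' => h', fun k hk1 hk2 => absurd hk1 (by omega), fun hlt => ?_⟩
    rcases not_and_or.mp h with h1 | h2
    · omega
    · omega

lemma mwsFold_some (nums : List Int) (ys : List Int) (M m : Int) :
    ys.foldl (mwsStep nums) (some (M, m)) =
      some ((ys.map (fun i => PySem.List.pyGetD nums i 0)).foldl max M,
            (ys.map (fun i => PySem.List.pyGetD nums i 0)).foldl min m) := by
  induction ys generalizing M m with
  | nil => rfl
  | cons y t ih => simp [mwsStep, ih]

lemma mwsFold_spec (nums : List Int) (a b : Int) (h : a < b) :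
    ∃ M m, (PySem.List.pyRange a b 1).foldl (mwsStep nums) none = some (M, m) ∧
      (∀ i, a ≤ i → i < b → m ≤ PySem.List.pyGetD nums i 0 ∧ PySem.List.pyGetD nums i 0 ≤ M) ∧
      (∃ i, a ≤ i ∧ i < b ∧ PySem.List.pyGetD nums i 0 = m) ∧
      (∃ i, a ≤ i ∧ i < b ∧ PySem.List.pyGetD nums i 0 = M) := by
  rw [PySem.List.pyRange_one_cons h, List.foldl_cons]
  have hstep : mwsStep nums none a = some (PySem.List.pyGetD nums a 0, PySem.List.pyGetD nums a 0) := rfl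
  rw [hstep, mwsFold_some]
  refine ⟨_, _, rfl, ?_, ?_, ?_⟩
  · intro i hai hib
    rcases eq_or_lt_of_le hai with rfl | hlt
    · exact ⟨(PySem.List.foldl_min_le _ _).1, (PySem.List.le_foldl_max _ _).1⟩
    · have hmem : PySem.List.pyGetD nums i 0 ∈
          (PySem.List.pyRange (a + 1) b 1).map (fun i => PySem.List.pyGetD nums i 0) :=
        List.mem_map.mpr ⟨i, (PySem.List.mem_pyRange_one).mpr ⟨by omega, hib⟩, rfl⟩
      exact ⟨(PySem.List.foldl_min_le _ _).2 _ hmem, (PySem.List.le_foldl_max _ _).2 _ hmem⟩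
  · rcases PySem.List.foldl_min_mem
        ((PySem.List.pyRange (a + 1) b 1).map (fun i => PySem.List.pyGetD nums i 0))
        (PySem.List.pyGetD nums a 0) with he | he
    · exact ⟨a, le_refl a, h, he.symm⟩
    · obtain ⟨i, hi, hgi⟩ := List.mem_map.mp he
      obtain ⟨h1, h2⟩ := (PySem.List.mem_pyRange_one).mp hi
      exact ⟨i, by omega, h2, hgi⟩
  · rcases PySem.List.foldl_max_mem
        ((PySem.List.pyRange (a + 1) b 1).map (fun i => PySem.List.pyGetD nums i 0))
        (PySem.List.pyGetD nums a 0) with he | he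
    · exact ⟨a, le_refl a, h, he.symm⟩
    · obtain ⟨i, hi, hgi⟩ := List.mem_map.mp he
      obtain ⟨h1, h2⟩ := (PySem.List.mem_pyRange_one).mp hi
      exact ⟨i, by omega, h2, hgi⟩

-- a Pairwise (≤) list is bounded below by its head and above by its last element
lemma mwsPairwise_head_le {l : List Int} (hp : l.Pairwise (· ≤ ·)) (h0 : 0 < l.length) :
    ∀ x ∈ l, l[0] ≤ x := by
  intro x hx
  obtain ⟨i, hi, rfl⟩ := List.mem_iff_getElem.mp hx
  rcases Nat.eq_zero_or_pos i with h | h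
  · subst h; rfl
  · exact List.pairwise_iff_getElem.mp hp 0 i h0 hi h

lemma mwsPairwise_le_getLast {l : List Int} (hp : l.Pairwise (· ≤ ·)) (h : l ≠ []) :
    ∀ x ∈ l, x ≤ l.getLast h := by
  intro x hx
  obtain ⟨i, hi, rfl⟩ := List.mem_iff_getElem.mp hx
  rw [List.getLast_eq_getElem]
  rcases Nat.lt_or_ge i (l.length - 1) with h1 | h1
  · exact List.pairwise_iff_getElem.mp hp i (l.length - 1) hi (by omega) h1
  · have : i = l.length - 1 := by omega
    subst this; rfl

-- B's value from a characterisation of the window [L, R]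
lemma mwsAlt_of_window (nums : List Int) (L R : Int)
    (hL0 : 0 ≤ L) (hLR : L ≤ R) (hRn : R < (nums.length : Int))
    (hPL : ∃ j, L < j ∧ j < (nums.length : Int) ∧
      PySem.List.pyGetD nums j 0 < PySem.List.pyGetD nums L 0)
    (hnP : ∀ i, 0 ≤ i → i < L → ∀ j, i < j → j < (nums.length : Int) →
      PySem.List.pyGetD nums i 0 ≤ PySem.List.pyGetD nums j 0)
    (hQR : ∃ i, 0 ≤ i ∧ i < R ∧
      PySem.List.pyGetD nums R 0 < PySem.List.pyGetD nums i 0)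
    (hnQ : ∀ j, R < j → j < (nums.length : Int) → ∀ i, 0 ≤ i → i < j →
      PySem.List.pyGetD nums i 0 ≤ PySem.List.pyGetD nums j 0) :
    minimum_window_sort_alt nums = R - L + 1 := by
  have hnn : L.toNat < nums.length ∧ R.toNat < nums.length ∧ L.toNat ≤ R.toNat := by omega
  obtain ⟨hLtn, hRtn, hLRt⟩ := hnn
  have hslen : (PySem.List.sorted nums (fun x => x) false).length = nums.length :=
    PySem.List.length_sorted nums (fun x => x) false
  -- index-form hypotheses (Nat getD form)
  have hcast : ∀ (xs : List Int) (i : Int), 0 ≤ i →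
      PySem.List.pyGetD xs i 0 = xs.getD i.toNat 0 := by
    intro xs i hi
    rw [show i = ((i.toNat : Nat) : Int) by omega, PySem.List.pyGetD_natCast]
    simp
    have hmx : (max i 0).toNat = i.toNat := by omega
    rw [hmx]
  have nP : ∀ it jt : Nat, it < L.toNat → it < jt → jt < nums.length →
      nums.getD it 0 ≤ nums.getD jt 0 := by
    intro it jt h1 h2 h3
    have := hnP (it : Int) (by omega) (by omega) (jt : Int) (by omega) (by omega)
    rwa [hcast _ _ (by omega), hcast _ _ (by omega), Int.toNat_natCast, Int.toNat_natCast] at this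
  have nQ : ∀ it jt : Nat, R.toNat < jt → jt < nums.length → it < jt →
      nums.getD it 0 ≤ nums.getD jt 0 := by
    intro it jt h1 h2 h3
    have := hnQ (jt : Int) (by omega) (by omega) (it : Int) (by omega) (by omega)
    rwa [hcast _ _ (by omega), hcast _ _ (by omega), Int.toNat_natCast, Int.toNat_natCast] at this
  have P1 : ∃ jt : Nat, L.toNat < jt ∧ jt < nums.length ∧
      nums.getD jt 0 < nums.getD L.toNat 0 := by
    obtain ⟨j, hj1, hj2, hj3⟩ := hPL
    refine ⟨j.toNat, by omega, by omega, ?_⟩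
    rwa [hcast _ _ (by omega), hcast _ _ hL0] at hj3
  have Q1 : ∃ it : Nat, it < R.toNat ∧
      nums.getD R.toNat 0 < nums.getD it 0 := by
    obtain ⟨i, hi1, hi2, hi3⟩ := hQR
    refine ⟨i.toNat, by omega, ?_⟩
    rwa [hcast _ _ (by omega), hcast _ _ hi1] at hi3
  -- getD / getElem bridges
  have hgde : ∀ (xs : List Int) (i : Nat) (h : i < xs.length), xs.getD i 0 = xs[i] := by
    intro xs i h; rw [List.getD_eq_getElem xs 0 h]
  -- ===== decomposition 1: s = take L ++ sorted (drop L) =====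
  have hdec1 : PySem.List.sorted nums (fun x => x) false =
      nums.take L.toNat ++ PySem.List.sorted (nums.drop L.toNat) (fun x => x) false := by
    apply PySem.List.sorted_id_eq_of_perm_of_pairwise
    · have hp := PySem.List.sorted_perm (nums.drop L.toNat) (fun x => x) false
      have := List.Perm.append_left (nums.take L.toNat) hp
      rwa [List.take_append_drop] at this
    · rw [List.pairwise_append]
      refine ⟨?_, ?_, ?_⟩
      · rw [List.pairwise_iff_getElem]
        intro i j hi hj hij
        have hlt : (nums.take L.toNat).length = min L.toNat nums.length := List.length_take
        have hi' : i < L.toNat := by omega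
        have hj' : j < L.toNat := by omega
        rw [List.getElem_take, List.getElem_take]
        rw [← hgde nums i (by omega), ← hgde nums j (by omega)]
        exact nP i j hi' hij (by omega)
      · have := PySem.List.sorted_pairwise (nums.drop L.toNat) (fun x => x)
        exact this
      · intro a ha b hb
        obtain ⟨i, hi, rfl⟩ := List.mem_iff_getElem.mp ha
        have hb' : b ∈ nums.drop L.toNat := (PySem.List.mem_sorted _ _ _ b).mp hb
        obtain ⟨k, hk, rfl⟩ := List.mem_iff_getElem.mp hb'
        have hlt : (nums.take L.toNat).length = min L.toNat nums.length := List.length_take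
        have hdl : (nums.drop L.toNat).length = nums.length - L.toNat := List.length_drop
        rw [List.getElem_take, List.getElem_drop]
        rw [← hgde nums i (by omega), ← hgde nums (L.toNat + k) (by omega)]
        exact nP i (L.toNat + k) (by omega) (by omega) (by omega)
  -- ===== decomposition 2: s = sorted (take (R+1)) ++ drop (R+1) =====
  have hdec2 : PySem.List.sorted nums (fun x => x) false =
      PySem.List.sorted (nums.take (R.toNat + 1)) (fun x => x) false ++ nums.drop (R.toNat + 1) := by
    apply PySem.List.sorted_id_eq_of_perm_of_pairwise
    · have hp := PySem.List.sorted_perm (nums.take (R.toNat + 1)) (fun x => x) false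
      have := List.Perm.append_right (nums.drop (R.toNat + 1)) hp
      rwa [List.take_append_drop] at this
    · rw [List.pairwise_append]
      have hlt : (nums.take (R.toNat + 1)).length = min (R.toNat + 1) nums.length := List.length_take
      have hdl : (nums.drop (R.toNat + 1)).length = nums.length - (R.toNat + 1) := List.length_drop
      refine ⟨?_, ?_, ?_⟩
      · exact PySem.List.sorted_pairwise (nums.take (R.toNat + 1)) (fun x => x)
      · rw [List.pairwise_iff_getElem]
        intro i j hi hj hij
        rw [List.getElem_drop, List.getElem_drop]
        rw [← hgde nums _ (by omega), ← hgde nums _ (by omega)]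
        exact nQ (R.toNat + 1 + i) (R.toNat + 1 + j) (by omega) (by omega) (by omega)
      · intro a ha b hb
        have ha' : a ∈ nums.take (R.toNat + 1) := (PySem.List.mem_sorted _ _ _ a).mp ha
        obtain ⟨i, hi, rfl⟩ := List.mem_iff_getElem.mp ha'
        obtain ⟨k, hk, rfl⟩ := List.mem_iff_getElem.mp hb
        rw [List.getElem_take, List.getElem_drop]
        rw [← hgde nums i (by omega), ← hgde nums (R.toNat + 1 + k) (by omega)]
        exact nQ i (R.toNat + 1 + k) (by omega) (by omega) (by omega)
  -- ===== pointwise consequences =====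
  have heqlow : ∀ it : Nat, it < L.toNat →
      (PySem.List.sorted nums (fun x => x) false).getD it 0 = nums.getD it 0 := by
    intro it hit
    rw [hdec1, List.getD_append _ _ _ _ (by simp [List.length_take]; omega)]
    rw [hgde _ it (by simp [List.length_take]; omega), List.getElem_take,
      hgde nums it (by omega)]
  have hneqL : (PySem.List.sorted nums (fun x => x) false).getD L.toNat 0 < nums.getD L.toNat 0 := by
    obtain ⟨jt, hj1, hj2, hj3⟩ := P1
    have hlen : (nums.take L.toNat).length = L.toNat := by simp [List.length_take]; omega
    have hstep : (PySem.List.sorted nums (fun x => x) false).getD L.toNat 0 =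
        (PySem.List.sorted (nums.drop L.toNat) (fun x => x) false).getD 0 0 := by
      rw [hdec1, List.getD_append_right _ _ _ _ (by omega), hlen, Nat.sub_self]
    rw [hstep]
    have hslen2 : (PySem.List.sorted (nums.drop L.toNat) (fun x => x) false).length =
        nums.length - L.toNat := by
      rw [PySem.List.length_sorted, List.length_drop]
    have hpos : 0 < (PySem.List.sorted (nums.drop L.toNat) (fun x => x) false).length := by omega
    have hhead := mwsPairwise_head_le
      (l := PySem.List.sorted (nums.drop L.toNat) (fun x => x) false)
      (PySem.List.sorted_pairwise (nums.drop L.toNat) (fun x => x)) hpos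
    have hmem : nums.getD jt 0 ∈ PySem.List.sorted (nums.drop L.toNat) (fun x => x) false := by
      rw [PySem.List.mem_sorted]
      have : nums.getD jt 0 = (nums.drop L.toNat)[jt - L.toNat]'(by simp [List.length_drop]; omega) := by
        rw [List.getElem_drop, hgde nums _ (by omega)]
        congr 1; omega
      rw [this]; exact List.getElem_mem _
    have := hhead _ hmem
    rw [hgde _ 0 hpos]
    omega
  have heqhigh : ∀ jt : Nat, R.toNat < jt → jt < nums.length →
      (PySem.List.sorted nums (fun x => x) false).getD jt 0 = nums.getD jt 0 := by
    intro jt h1 h2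
    have hlen : (PySem.List.sorted (nums.take (R.toNat + 1)) (fun x => x) false).length =
        R.toNat + 1 := by
      rw [PySem.List.length_sorted]; simp [List.length_take]; omega
    rw [hdec2, List.getD_append_right _ _ _ _ (by omega), hlen]
    rw [hgde _ _ (by simp [List.length_drop]; omega), List.getElem_drop,
      hgde nums _ (by omega)]
    congr 1; omega
  have hneqR : nums.getD R.toNat 0 < (PySem.List.sorted nums (fun x => x) false).getD R.toNat 0 := by
    obtain ⟨it, hi1, hi3⟩ := Q1
    have hlen : (PySem.List.sorted (nums.take (R.toNat + 1)) (fun x => x) false).length =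
        R.toNat + 1 := by
      rw [PySem.List.length_sorted]; simp [List.length_take]; omega
    have hstep : (PySem.List.sorted nums (fun x => x) false).getD R.toNat 0 =
        (PySem.List.sorted (nums.take (R.toNat + 1)) (fun x => x) false).getD R.toNat 0 := by
      rw [hdec2, List.getD_append _ _ _ _ (by omega)]
    rw [hstep]
    have hne : PySem.List.sorted (nums.take (R.toNat + 1)) (fun x => x) false ≠ [] := by
      intro hcon
      have := hlen; rw [hcon] at this; simp at this
    have hlast := mwsPairwise_le_getLast
      (l := PySem.List.sorted (nums.take (R.toNat + 1)) (fun x => x) false)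
      (PySem.List.sorted_pairwise (nums.take (R.toNat + 1)) (fun x => x)) hne
    have hmem : nums.getD it 0 ∈ PySem.List.sorted (nums.take (R.toNat + 1)) (fun x => x) false := by
      rw [PySem.List.mem_sorted]
      have : nums.getD it 0 = (nums.take (R.toNat + 1))[it]'(by simp [List.length_take]; omega) := by
        rw [List.getElem_take, hgde nums _ (by omega)]
      rw [this]; exact List.getElem_mem _
    have hle := hlast _ hmem
    have hgl : (PySem.List.sorted (nums.take (R.toNat + 1)) (fun x => x) false).getLast hne =
        (PySem.List.sorted (nums.take (R.toNat + 1)) (fun x => x) false).getD R.toNat 0 := by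
      rw [List.getLast_eq_getElem, hgde _ _ (by omega)]
      congr 1; omega
    rw [hgl] at hle
    omega
  -- ===== evaluate B =====
  simp only [minimum_window_sort_alt]
  have hpredlow : ∀ a ∈ PySem.List.pyRange 0 L 1,
      ¬ (decide (PySem.List.pyGetD nums a 0 ≠
        PySem.List.pyGetD (PySem.List.sorted nums (fun x => x) false) a 0) = true) := by
    intro a ha
    obtain ⟨h1, h2⟩ := PySem.List.mem_pyRange_one.mp ha
    rw [hcast _ _ h1, hcast _ _ h1, heqlow a.toNat (by omega)]
    simp
  have hpredhigh : ∀ a ∈ PySem.List.pyRange (R + 1) (nums.length : Int) 1,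
      ¬ (decide (PySem.List.pyGetD nums a 0 ≠
        PySem.List.pyGetD (PySem.List.sorted nums (fun x => x) false) a 0) = true) := by
    intro a ha
    obtain ⟨h1, h2⟩ := PySem.List.mem_pyRange_one.mp ha
    rw [hcast _ _ (by omega), hcast _ _ (by omega), heqhigh a.toNat (by omega) (by omega)]
    simp
  have hpredL : (decide (PySem.List.pyGetD nums L 0 ≠
      PySem.List.pyGetD (PySem.List.sorted nums (fun x => x) false) L 0) = true) := by
    rw [hcast _ _ hL0, hcast _ _ hL0]
    simp only [decide_eq_true_eq]
    omega
  have hpredR : (decide (PySem.List.pyGetD nums R 0 ≠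
      PySem.List.pyGetD (PySem.List.sorted nums (fun x => x) false) R 0) = true) := by
    rw [hcast _ _ (by omega), hcast _ _ (by omega)]
    simp only [decide_eq_true_eq]
    omega
  have hsplit : PySem.List.pyRange 0 (nums.length : Int) 1 =
      PySem.List.pyRange 0 L 1 ++ (PySem.List.pyRange L (R + 1) 1 ++
        PySem.List.pyRange (R + 1) (nums.length : Int) 1) := by
    rw [← PySem.List.pyRange_one_append L (R + 1) (nums.length : Int) (by omega) (by omega),
      ← PySem.List.pyRange_one_append 0 L (nums.length : Int) hL0 (by omega)]
  rw [hsplit, List.filter_append, List.filter_append,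
    List.filter_eq_nil_iff.mpr hpredlow, List.filter_eq_nil_iff.mpr hpredhigh,
    List.nil_append, List.append_nil]
  set p : Int → Bool := fun i => decide (PySem.List.pyGetD nums i 0 ≠
    PySem.List.pyGetD (PySem.List.sorted nums (fun x => x) false) i 0) with hp
  have hpL' : p L = true := hpredL
  have hpR' : p R = true := hpredR
  have h0 : List.filter p (PySem.List.pyRange L (R + 1) 1) =
      L :: List.filter p (PySem.List.pyRange (L + 1) (R + 1) 1) := by
    rw [PySem.List.pyRange_one_cons (by omega), List.filter_cons, if_pos hpL']
  have h1 : List.filter p (PySem.List.pyRange L (R + 1) 1) =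
      List.filter p (PySem.List.pyRange L R 1) ++ [R] := by
    rw [PySem.List.pyRange_one_succ_right (by omega), List.filter_append]
    congr 1
    rw [List.filter_cons, if_pos hpR', List.filter_nil]
  have hne : List.filter p (PySem.List.pyRange L (R + 1) 1) ≠ [] := by
    rw [h0]; exact List.cons_ne_nil _ _
  have hv0 : PySem.List.pyGetD (List.filter p (PySem.List.pyRange L (R + 1) 1)) 0 0 = L := by
    rw [h0, PySem.List.pyGetD_zero_cons]
  have hv1 : PySem.List.pyGetD (List.filter p (PySem.List.pyRange L (R + 1) 1)) (-1) 0 = R := by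
    rw [h1, PySem.List.pyGetD_neg_one_append_singleton]
  rw [if_neg hne, hv0, hv1]

-- sorted case: B returns 0
lemma mwsAlt_sorted (nums : List Int)
    (hadj : ∀ k, 0 ≤ k → k < (nums.length : Int) - 1 →
      PySem.List.pyGetD nums k 0 ≤ PySem.List.pyGetD nums (k + 1) 0) :
    minimum_window_sort_alt nums = 0 := by
  have hmono := mwsChainMono (fun k => PySem.List.pyGetD nums k 0) 0 ((nums.length : Int) - 1) hadj
  have hpw : nums.Pairwise (fun a b => a ≤ b) := by
    rw [List.pairwise_iff_getElem]
    intro i j hi hj hij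
    have := hmono (i : Int) (j : Int) (by omega) (by omega) (by omega)
    simpa [PySem.List.pyGetD_natCast, List.getD_eq_getElem, hi, hj] using this
  have hs : PySem.List.sorted nums (fun x => x) false = nums :=
    PySem.List.sorted_eq_self_of_pairwise nums (fun x => x) hpw
  simp only [minimum_window_sort_alt, hs]
  rw [List.filter_eq_nil_iff.mpr (by intro a _; simp)]
  simp

-- ===== VERDICT (by name: the statement is the Claim_ definition above) =====
theorem minimum_window_sort_spec : Claim_equal_minimum_window_sort := by
  intro nums _
  unfold Spec_minimum_window_sort
  by_cases hnil : nums = []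
  · subst hnil
    have h1 : mwsGrowL [] 0 = 0 := by rw [mwsGrowL.eq_def]; norm_num
    have h2 : mwsShrinkR ([] : List Int) (-1) = -1 := by rw [mwsShrinkR.eq_def]; norm_num
    have h3 : ∀ mv, mwsExtL ([] : List Int) mv 0 = 0 := by
      intro mv; rw [mwsExtL.eq_def]; norm_num
    have h4 : ∀ Mv, mwsExtR ([] : List Int) Mv (-1) = -1 := by
      intro Mv; rw [mwsExtR.eq_def]; norm_num
    simp [minimum_window_sort, minimum_window_sort_alt, h1, h2, h3, h4,
      PySem.List.pyRange_one_eq_nil (by omega : (0:Int) ≤ 0)]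
  · have hn : 1 ≤ (nums.length : Int) := by
      have : nums.length ≠ 0 := fun h => hnil (List.eq_nil_of_length_eq_zero h)
      omega
    obtain ⟨g1, g2, g3, g4⟩ := mwsGrowL_spec nums 0
    by_cases hsorted : mwsGrowL nums 0 = (nums.length : Int) - 1
    · simp only [minimum_window_sort]
      rw [if_pos hsorted]
      rw [mwsAlt_sorted nums (fun k hk1 hk2 => g3 k hk1 (by omega))]
    · have hl0lt : mwsGrowL nums 0 < (nums.length : Int) - 1 := by
        have := g2 (by omega)
        omega
      obtain ⟨s1, s2', s3, s4⟩ := mwsShrinkR_spec nums ((nums.length : Int) - 1)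
      have s2 : 0 ≤ mwsShrinkR nums ((nums.length : Int) - 1) := s2' (by omega)
      have hl0r0 : mwsGrowL nums 0 + 1 ≤ mwsShrinkR nums ((nums.length : Int) - 1) := by
        by_contra hcon
        have hadj := s3 (mwsGrowL nums 0 + 1) (by omega) (by omega)
        have := g4 hl0lt
        simp only [add_sub_cancel_right] at hadj
        omega
      obtain ⟨M, m, hfold, hbnd, ⟨im, him1, him2, him3⟩, ⟨iM, hiM1, hiM2, hiM3⟩⟩ :=
        mwsFold_spec nums (mwsGrowL nums 0) (mwsShrinkR nums ((nums.length : Int) - 1) + 1)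
          (by omega)
      obtain ⟨e1, e2', e3, e4⟩ := mwsExtL_spec nums m (mwsGrowL nums 0)
      have e2 : 0 ≤ mwsExtL nums m (mwsGrowL nums 0) := e2' g1
      obtain ⟨E1, E2', E3, E4⟩ := mwsExtR_spec nums M (mwsShrinkR nums ((nums.length : Int) - 1))
      have E2 : mwsExtR nums M (mwsShrinkR nums ((nums.length : Int) - 1)) ≤
          (nums.length : Int) - 1 := E2' (by omega)
      have hmono : ∀ i j, 0 ≤ i → i ≤ j → j ≤ mwsGrowL nums 0 →
          PySem.List.pyGetD nums i 0 ≤ PySem.List.pyGetD nums j 0 :=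
        mwsChainMono (fun k => PySem.List.pyGetD nums k 0) 0 (mwsGrowL nums 0)
          (fun k hk1 hk2 => g3 k hk1 hk2)
      have hsuff : ∀ i j, mwsShrinkR nums ((nums.length : Int) - 1) ≤ i → i ≤ j →
          j ≤ (nums.length : Int) - 1 →
          PySem.List.pyGetD nums i 0 ≤ PySem.List.pyGetD nums j 0 :=
        mwsChainMono (fun k => PySem.List.pyGetD nums k 0)
          (mwsShrinkR nums ((nums.length : Int) - 1)) ((nums.length : Int) - 1)
          (fun k hk1 hk2 => by
            have := s3 (k + 1) (by omega) (by omega)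
            simpa using this)
      have hminsuff : ∀ j, mwsGrowL nums 0 ≤ j → j < (nums.length : Int) →
          m ≤ PySem.List.pyGetD nums j 0 := by
        intro j hj1 hj2
        by_cases hj3 : j ≤ mwsShrinkR nums ((nums.length : Int) - 1)
        · exact (hbnd j hj1 (by omega)).1
        · have h1 : m ≤ PySem.List.pyGetD nums (mwsShrinkR nums ((nums.length : Int) - 1)) 0 :=
            (hbnd _ (by omega) (by omega)).1
          have h2 := hsuff (mwsShrinkR nums ((nums.length : Int) - 1)) j (le_refl _)
            (by omega) (by omega)
          omega
      have hmaxpre : ∀ i, 0 ≤ i → i ≤ mwsShrinkR nums ((nums.length : Int) - 1) →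
          PySem.List.pyGetD nums i 0 ≤ M := by
        intro i hi1 hi2
        by_cases hi3 : mwsGrowL nums 0 ≤ i
        · exact (hbnd i hi3 (by omega)).2
        · have h1 := hmono i (mwsGrowL nums 0) hi1 (by omega) (le_refl _)
          have h2 : PySem.List.pyGetD nums (mwsGrowL nums 0) 0 ≤ M :=
            (hbnd _ (le_refl _) (by omega)).2
          omega
      have hkey := mwsAlt_of_window nums (mwsExtL nums m (mwsGrowL nums 0))
        (mwsExtR nums M (mwsShrinkR nums ((nums.length : Int) - 1)))
        e2 (by omega) (by omega)
        (by
          rcases eq_or_lt_of_le e1 with heq | hlt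
          · exact ⟨mwsGrowL nums 0 + 1, by omega, by omega, by rw [heq]; exact g4 hl0lt⟩
          · refine ⟨im, by omega, by omega, ?_⟩
            rw [him3]
            exact e3 _ (le_refl _) hlt)
        (by
          intro i hi0 hil2 j hij hjn
          by_cases hjl0 : j ≤ mwsGrowL nums 0
          · exact hmono i j hi0 (by omega) hjl0
          · have h1 := hmono i (mwsExtL nums m (mwsGrowL nums 0) - 1) hi0 (by omega) (by omega)
            have h2 := e4 (by omega)
            have h3 := hminsuff j (by omega) hjn
            omega)
        (by
          rcases eq_or_lt_of_le E1 with heq | hlt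
          · refine ⟨mwsShrinkR nums ((nums.length : Int) - 1) - 1, by omega, by omega, ?_⟩
            rw [← heq]
            exact s4 (by omega)
          · refine ⟨iM, by omega, by omega, ?_⟩
            rw [hiM3]
            exact E3 _ hlt (le_refl _))
        (by
          intro j hj1 hj2 i hi0 hij
          have hr2lt : mwsExtR nums M (mwsShrinkR nums ((nums.length : Int) - 1)) <
              (nums.length : Int) - 1 := by omega
          have hMj : M ≤ PySem.List.pyGetD nums j 0 := by
            have h1 := E4 hr2lt
            have h2 := hsuff (mwsExtR nums M (mwsShrinkR nums ((nums.length : Int) - 1)) + 1) j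
              (by omega) (by omega) (by omega)
            omega
          by_cases hi3 : i ≤ mwsShrinkR nums ((nums.length : Int) - 1)
          · have := hmaxpre i hi0 hi3
            omega
          · exact hsuff i j (by omega) (by omega) (by omega))
      simp only [minimum_window_sort]
      rw [if_neg hsorted, hfold]
      simp only [Option.map_some, Option.getD_some]
      rw [hkey]
      ring
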